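-- pv_equiv track=rewrite | github.com/Joker-vD/onepass-lambda-compiler | translator.py | mangle_for_c
-- ===== SOURCE A (Python) =====
-- def mangle_for_c(name):
--     result = ''
--     for ch in name:
--         if ch == '_':
--             result += '_x5F'
--         elif ch == '\'':
--             result += '_x27'
--         else:
--             result += ch
--     return result
-- ===== SOURCE B (Python) =====
-- def mangle_for_c(name):
--     return name.replace('_', '_x5F').replace("'", '_x27')
-- ===== Notes on version B (the rewrite author's own statement) =====
-- stated objective: idiomatic
-- what changed: Replaced the char-by-char accumulating loop with two whole-string str.replace passes (underscores first, then quotes), which is safe because the escape sequences introduced by each pass contain no character the other pass rewrites after it.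
import Mathlib
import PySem

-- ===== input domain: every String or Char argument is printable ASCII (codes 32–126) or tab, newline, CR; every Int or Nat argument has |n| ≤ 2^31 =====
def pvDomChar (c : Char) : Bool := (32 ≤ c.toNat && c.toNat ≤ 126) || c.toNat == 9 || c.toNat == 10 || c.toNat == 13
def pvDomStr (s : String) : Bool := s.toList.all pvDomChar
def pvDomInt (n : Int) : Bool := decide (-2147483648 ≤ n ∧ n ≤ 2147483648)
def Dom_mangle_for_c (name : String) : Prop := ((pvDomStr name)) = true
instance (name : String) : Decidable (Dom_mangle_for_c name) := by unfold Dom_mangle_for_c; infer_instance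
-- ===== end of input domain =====

-- B replaces A's char-by-char accumulating loop with two whole-string replace passes (idiomatic).

-- ===== PORT A =====
def mangle_for_c (name : String) : String :=
  name.toList.foldl (fun result ch =>
    if ch = '_' then result ++ "_x5F"
    else if ch = '\'' then result ++ "_x27"
    else result ++ String.ofList [ch]) ""

-- ===== PORT B =====
def mangle_for_c_alt (name : String) : String :=
  PySem.Str.replace (PySem.Str.replace name "_" "_x5F") "'" "_x27"

-- ===== PRECONDITION & SPEC =====
def Spec_mangle_for_c (name : String) (out : String) : Prop := out = mangle_for_c_alt name
instance (name : String) (out : String) : Decidable (Spec_mangle_for_c name out) := by unfold Spec_mangle_for_c; infer_instance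

-- ===== CLAIM (what is proved, stated in full; the proofs are below) =====
def Claim_equal_mangle_for_c : Prop := ∀ (name : String), Dom_mangle_for_c name → Spec_mangle_for_c name (mangle_for_c name)

-- ===== LEMMAS AND PROOFS =====

-- single-char replace is a per-character substitution
theorem replace_go_single (o : Char) (new : List Char) :
    ∀ (fuel : Nat) (l acc : List Char), l.length ≤ fuel →
      PySem.Chars.replace.go [o] new fuel l acc
        = acc.reverse ++ l.flatMap (fun c => if c = o then new else [c]) := by
  intro fuel
  induction fuel with
  | zero =>
    intro l acc h
    have : l = [] := List.length_eq_zero_iff.mp (Nat.le_zero.mp h)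
    subst this
    simp [PySem.Chars.replace.go]
  | succ n ih =>
    intro l acc h
    cases l with
    | nil => simp [PySem.Chars.replace.go]
    | cons c t =>
      simp only [PySem.Chars.replace.go]
      by_cases hc : c = o
      · subst hc
        have hp : List.isPrefixOf [c] (c :: t) = true := by
          simp [List.isPrefixOf]
        simp only [hp, if_true, List.length_cons, List.length_nil, List.length_singleton, List.drop_succ_cons, List.drop_zero, List.flatMap_cons, Nat.zero_add, ite_true, if_pos]
        rw [ih t (new.reverse ++ acc) (by simpa using Nat.le_of_succ_le_succ h)]
        simp
      · have hp : List.isPrefixOf [o] (c :: t) = false := by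
          simp [List.isPrefixOf]
          intro hco; exact absurd hco.symm hc
        simp only [hp, Bool.false_eq_true, if_false, List.flatMap_cons, if_neg hc]
        rw [ih t (c :: acc) (by simpa using Nat.le_of_succ_le_succ h)]
        simp

theorem replace_single (o : Char) (new s : List Char) :
    PySem.Chars.replace s [o] new = s.flatMap (fun c => if c = o then new else [c]) := by
  rw [PySem.Chars.replace]
  simp only [List.isEmpty_cons, Bool.false_eq_true, if_false]
  exact replace_go_single o new s.length s [] (le_refl _)

def mangleChar (c : Char) : List Char :=
  if c = '_' then "_x5F".toList else if c = '\'' then "_x27".toList else [c]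

theorem foldlA_eq (l : List Char) : ∀ (acc : String),
    l.foldl (fun result ch =>
      if ch = '_' then result ++ "_x5F"
      else if ch = '\'' then result ++ "_x27"
      else result ++ String.ofList [ch]) acc
    = acc ++ String.ofList (l.flatMap mangleChar) := by
  induction l with
  | nil => intro acc; simp
  | cons c t ih =>
    intro acc
    simp only [List.foldl_cons, List.flatMap_cons, ih, mangleChar]
    split_ifs with h1 h2 <;> subst_vars <;>
      refine String.ext ?_ <;> simp [String.toList_append]

theorem flatMap_quote (l : List Char) :
    (l.flatMap (fun c => if c = '_' then "_x5F".toList else [c])).flatMap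
        (fun c => if c = '\'' then "_x27".toList else [c])
      = l.flatMap mangleChar := by
  induction l with
  | nil => rfl
  | cons c t ih =>
    simp only [List.flatMap_cons, List.flatMap_append, ih]
    congr 1
    by_cases h1 : c = '_'
    · subst h1; decide
    · by_cases h2 : c = '\''
      · subst h2; simp [mangleChar]
      · simp [h1, h2, mangleChar]

-- ===== VERDICT (by name: the statement is the Claim_ definition above) =====
theorem mangle_for_c_spec : Claim_equal_mangle_for_c := by
  intro name _
  unfold Spec_mangle_for_c mangle_for_c mangle_for_c_alt
  rw [foldlA_eq]
  refine String.ext ?_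
  rw [PySem.Str.toList_replace, PySem.Str.toList_replace]
  show _ = PySem.Chars.replace (PySem.Chars.replace name.toList ['_'] "_x5F".toList) ['\''] "_x27".toList
  rw [replace_single, replace_single, flatMap_quote]
  simp
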